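-- pv_equiv track=rewrite | github.com/DrSatsuma1/westview | pdf_to_json.py | determine_pathway
-- ===== SOURCE A (Python) =====
-- def determine_pathway(text: str, course_name: str) -> str:
--     """Determine the pathway/subject area"""
--     text_combined = (text + ' ' + course_name).lower()
--
--     if any(word in text_combined for word in ['spanish', 'chinese', 'french', 'language']):
--         return 'World Language'
--     elif 'math' in text_combined or 'calculus' in text_combined or 'algebra' in text_combined:
--         return 'Mathematics'
--     elif any(word in text_combined for word in ['biology', 'chemistry', 'physics']):
--         if any(word in text_combined for word in ['biology', 'living']):
--             return 'Science - Biological'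
--         else:
--             return 'Science - Physical'
--     elif any(word in text_combined for word in ['history', 'government', 'social']):
--         return 'History/Social Science'
--     elif 'english' in text_combined:
--         return 'English'
--     elif any(word in text_combined for word in ['art', 'music', 'drama', 'visual']):
--         return 'Visual & Performing Arts'
--     elif any(word in text_combined for word in ['pe', 'physical education', 'health']):
--         return 'Physical Education'
--     else:
--         return 'Elective'
-- ===== SOURCE B (Python) =====
-- # Exhaustive keyword scoring: every keyword carries a priority; collect the
-- # priorities of all keywords present and keep the smallest, instead of a
-- # short-circuiting if/elif cascade.
-- KEYWORD_PRIORITY = {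
--     'spanish': 0, 'chinese': 0, 'french': 0, 'language': 0,
--     'math': 1, 'calculus': 1, 'algebra': 1,
--     'biology': 2, 'chemistry': 2, 'physics': 2,
--     'history': 3, 'government': 3, 'social': 3,
--     'english': 4,
--     'art': 5, 'music': 5, 'drama': 5, 'visual': 5,
--     'pe': 6, 'physical education': 6, 'health': 6,
-- }
--
-- PRIORITY_LABEL = ['World Language', 'Mathematics', 'Science',
--                   'History/Social Science', 'English',
--                   'Visual & Performing Arts', 'Physical Education']
--
--
-- def determine_pathway(text: str, course_name: str) -> str:
--     """Determine the pathway/subject area"""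
--     t = (text + ' ' + course_name).lower()
--     hits = [p for w, p in KEYWORD_PRIORITY.items() if w in t]
--     if not hits:
--         return 'Elective'
--     best = min(hits)
--     if best == 2:
--         return 'Science - Biological' if 'biology' in t or 'living' in t else 'Science - Physical'
--     return PRIORITY_LABEL[best]
-- ===== Notes on version B (the rewrite author's own statement) =====
-- stated objective: alternative
-- what changed: Replaced the short-circuiting if/elif cascade by exhaustive scoring: every keyword carries a numeric priority in one dict, B collects the priorities of all keywords present in the lowered text and returns the label of the minimum priority (with the one Science biological/physical sub-split), 'Elective' when no keyword matches.
import Mathlib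
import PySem

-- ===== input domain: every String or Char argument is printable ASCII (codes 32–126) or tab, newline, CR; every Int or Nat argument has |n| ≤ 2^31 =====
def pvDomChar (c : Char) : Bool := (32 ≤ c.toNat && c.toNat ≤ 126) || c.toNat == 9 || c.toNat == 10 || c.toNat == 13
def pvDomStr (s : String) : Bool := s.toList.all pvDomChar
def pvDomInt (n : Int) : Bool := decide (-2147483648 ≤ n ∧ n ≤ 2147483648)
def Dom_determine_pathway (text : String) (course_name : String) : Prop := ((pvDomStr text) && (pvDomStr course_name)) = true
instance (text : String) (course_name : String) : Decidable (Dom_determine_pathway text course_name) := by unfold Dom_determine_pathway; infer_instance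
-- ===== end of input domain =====

-- B replaces A's short-circuiting if/elif cascade by exhaustive keyword scoring: collect the
-- priorities of all matching keywords and take the minimum (alternative decomposition, same cost).

-- ===== PORT A =====
-- 'w in t' is PySem.Chars.isIn; concatenation and lower are done on List Char (exact).
def determine_pathway (text : String) (course_name : String) : String :=
  let tc := PySem.Chars.lower (text.toList ++ ' ' :: course_name.toList)
  if ["spanish", "chinese", "french", "language"].any (fun w => PySem.Chars.isIn w.toList tc) then
    "World Language"
  else if PySem.Chars.isIn "math".toList tc || PySem.Chars.isIn "calculus".toList tc
      || PySem.Chars.isIn "algebra".toList tc then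
    "Mathematics"
  else if ["biology", "chemistry", "physics"].any (fun w => PySem.Chars.isIn w.toList tc) then
    if ["biology", "living"].any (fun w => PySem.Chars.isIn w.toList tc) then
      "Science - Biological"
    else
      "Science - Physical"
  else if ["history", "government", "social"].any (fun w => PySem.Chars.isIn w.toList tc) then
    "History/Social Science"
  else if PySem.Chars.isIn "english".toList tc then
    "English"
  else if ["art", "music", "drama", "visual"].any (fun w => PySem.Chars.isIn w.toList tc) then
    "Visual & Performing Arts"
  else if ["pe", "physical education", "health"].any (fun w => PySem.Chars.isIn w.toList tc) then
    "Physical Education"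
  else
    "Elective"

-- ===== PORT B =====
-- KEYWORD_PRIORITY of Source B (a dict with distinct keys, read only by .items(): an assoc list)
def pvKP : List (String × Int) :=
  [("spanish", 0), ("chinese", 0), ("french", 0), ("language", 0),
   ("math", 1), ("calculus", 1), ("algebra", 1),
   ("biology", 2), ("chemistry", 2), ("physics", 2),
   ("history", 3), ("government", 3), ("social", 3),
   ("english", 4),
   ("art", 5), ("music", 5), ("drama", 5), ("visual", 5),
   ("pe", 6), ("physical education", 6), ("health", 6)]

-- PRIORITY_LABEL of Source B
def pvLabels : List String :=
  ["World Language", "Mathematics", "Science", "History/Social Science", "English",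
   "Visual & Performing Arts", "Physical Education"]

-- hits = [p for w, p in KEYWORD_PRIORITY.items() if w in t]
def pvHits (t : List Char) : List Int :=
  (pvKP.filter (fun wp => PySem.Chars.isIn wp.1.toList t)).map Prod.snd

-- min(p0 :: rest): Python's min as a left fold keeping the first minimal element
def pvMin1 (p0 : Int) (rest : List Int) : Int :=
  rest.foldl (fun b x => if x < b then x else b) p0

-- 'if not hits: return Elective; best = min(hits); …' of Source B
def pvClassifyHits (t : List Char) : List Int → String
  | [] => "Elective"
  | p0 :: rest =>
    let best := pvMin1 p0 rest
    if best = 2 then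
      if PySem.Chars.isIn "biology".toList t || PySem.Chars.isIn "living".toList t then
        "Science - Biological"
      else
        "Science - Physical"
    else
      -- PRIORITY_LABEL[best]; best is always 0..6 here, so the getD default is unreachable
      (PySem.List.pyGet? pvLabels best).getD ""

def determine_pathway_alt (text : String) (course_name : String) : String :=
  let t := PySem.Chars.lower (text.toList ++ ' ' :: course_name.toList)
  pvClassifyHits t (pvHits t)

-- ===== PRECONDITION & SPEC =====
def Spec_determine_pathway (text : String) (course_name : String) (out : String) : Prop := out = determine_pathway_alt text course_name
instance (text : String) (course_name : String) (out : String) : Decidable (Spec_determine_pathway text course_name out) := by unfold Spec_determine_pathway; infer_instance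

-- ===== CLAIM (what is proved, stated in full; the proofs are below) =====
def Claim_equal_determine_pathway : Prop := ∀ (text : String) (course_name : String), Dom_determine_pathway text course_name → Spec_determine_pathway text course_name (determine_pathway text course_name)

-- ===== LEMMAS AND PROOFS =====

theorem pvMin1_le (l : List Int) (p0 : Int) :
    pvMin1 p0 l ≤ p0 ∧ ∀ x ∈ l, pvMin1 p0 l ≤ x := by
  induction l generalizing p0 with
  | nil => exact ⟨Int.le_refl _, by intro x hx; cases hx⟩
  | cons a l ih =>
    have heq : pvMin1 p0 (a :: l) = pvMin1 (if a < p0 then a else p0) l := rfl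
    have hq1 : (if a < p0 then a else p0) ≤ p0 := by split <;> omega
    have hq2 : (if a < p0 then a else p0) ≤ a := by split <;> omega
    obtain ⟨i1, i2⟩ := ih (if a < p0 then a else p0)
    refine ⟨heq ▸ le_trans i1 hq1, ?_⟩
    intro x hx
    rcases List.mem_cons.mp hx with rfl | hx'
    · exact heq ▸ le_trans i1 hq2
    · exact heq ▸ i2 x hx'

theorem pvMin1_mem (l : List Int) (p0 : Int) : pvMin1 p0 l = p0 ∨ pvMin1 p0 l ∈ l := by
  induction l generalizing p0 with
  | nil => left; rfl
  | cons a l ih =>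
    have : pvMin1 p0 (a :: l) = pvMin1 (if a < p0 then a else p0) l := rfl
    rw [this]
    rcases ih (if a < p0 then a else p0) with h | h
    · rw [h]; split
      · right; exact List.mem_cons_self
      · left; rfl
    · right; exact List.mem_cons_of_mem _ h

theorem pvMem_hits {t : List Char} {w : String} {p : Int}
    (hw : (w, p) ∈ pvKP) (ht : PySem.Chars.isIn w.toList t = true) : p ∈ pvHits t := by
  simp only [pvHits, List.mem_map]
  exact ⟨(w, p), List.mem_filter.mpr ⟨hw, ht⟩, rfl⟩

theorem pvHits_lb {t : List Char} {k : Int}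
    (h : ∀ wp ∈ pvKP, wp.2 < k → PySem.Chars.isIn wp.1.toList t = false) :
    ∀ x ∈ pvHits t, k ≤ x := by
  intro x hx
  simp only [pvHits, List.mem_map, List.mem_filter] at hx
  obtain ⟨wp, ⟨hm, hf⟩, rfl⟩ := hx
  by_contra hc
  have := h wp hm (by omega)
  rw [this] at hf
  cases hf

theorem pvNotAny {l : List String} {t : List Char}
    (h : ¬ (l.any (fun w => PySem.Chars.isIn w.toList t)) = true)
    {w : String} (hw : w ∈ l) : PySem.Chars.isIn w.toList t = false := by
  cases hh : PySem.Chars.isIn w.toList t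
  · rfl
  · exact absurd (List.any_eq_true.mpr ⟨w, hw, hh⟩) h

theorem pvClassify_eq {t : List Char} {k : Int}
    (hk : k ∈ pvHits t) (hlb : ∀ x ∈ pvHits t, k ≤ x) :
    pvClassifyHits t (pvHits t) =
      (if k = 2 then
        (if PySem.Chars.isIn "biology".toList t || PySem.Chars.isIn "living".toList t then
          "Science - Biological" else "Science - Physical")
      else (PySem.List.pyGet? pvLabels k).getD "") := by
  cases hh : pvHits t with
  | nil => rw [hh] at hk; cases hk
  | cons p0 rest =>
    have hmin : pvMin1 p0 rest = k := by
      apply le_antisymm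
      · rw [hh] at hk
        rcases List.mem_cons.mp hk with rfl | hk'
        · exact (pvMin1_le rest k).1
        · exact (pvMin1_le rest p0).2 k hk'
      · rcases pvMin1_mem rest p0 with h | h
        · rw [h]; exact hlb p0 (by rw [hh]; exact List.mem_cons_self)
        · exact hlb _ (by rw [hh]; exact List.mem_cons_of_mem _ h)
    simp only [pvClassifyHits, hmin]

-- ===== VERDICT (by name: the statement is the Claim_ definition above) =====
set_option maxHeartbeats 2000000 in
theorem determine_pathway_spec : Claim_equal_determine_pathway := by
  intro text course_name _
  unfold Spec_determine_pathway determine_pathway determine_pathway_alt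
  simp only []
  generalize PySem.Chars.lower (text.toList ++ ' ' :: course_name.toList) = t
  by_cases h0 : (["spanish", "chinese", "french", "language"].any
      (fun w => PySem.Chars.isIn w.toList t)) = true
  · rw [if_pos h0]
    have hk : (0 : Int) ∈ pvHits t := by
      obtain ⟨w, hw, h⟩ := List.any_eq_true.mp h0
      fin_cases hw <;> exact pvMem_hits (by decide) h
    rw [pvClassify_eq hk (pvHits_lb (by intro wp hm hlt; fin_cases hm <;> simp_all)),
        if_neg (by decide)]
    decide
  · rw [if_neg h0]
    by_cases h1 : (PySem.Chars.isIn "math".toList t || PySem.Chars.isIn "calculus".toList t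
        || PySem.Chars.isIn "algebra".toList t) = true
    · rw [if_pos h1]
      have hk : (1 : Int) ∈ pvHits t := by
        simp only [Bool.or_eq_true] at h1
        rcases h1 with (h | h) | h <;> exact pvMem_hits (by decide) h
      rw [pvClassify_eq hk (pvHits_lb (by
            intro wp hm hlt; fin_cases hm <;>
              first
                | exact absurd hlt (by decide)
                | exact pvNotAny h0 (by decide))),
          if_neg (by decide)]
      decide
    · rw [if_neg h1]
      have h1' : PySem.Chars.isIn "math".toList t = false ∧
          PySem.Chars.isIn "calculus".toList t = false ∧
          PySem.Chars.isIn "algebra".toList t = false := by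
        simp only [Bool.or_eq_true, not_or, Bool.not_eq_true] at h1
        exact ⟨h1.1.1, h1.1.2, h1.2⟩
      obtain ⟨hma, hca, hal⟩ := h1'
      by_cases h2 : (["biology", "chemistry", "physics"].any
          (fun w => PySem.Chars.isIn w.toList t)) = true
      · rw [if_pos h2]
        have hk : (2 : Int) ∈ pvHits t := by
          obtain ⟨w, hw, h⟩ := List.any_eq_true.mp h2
          fin_cases hw <;> exact pvMem_hits (by decide) h
        rw [pvClassify_eq hk (pvHits_lb (by
              intro wp hm hlt; fin_cases hm <;>
                first
                  | exact absurd hlt (by decide)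
                  | exact pvNotAny h0 (by decide)
                  | exact hma
                  | exact hca
                  | exact hal)),
            if_pos rfl]
        simp [List.any_cons, List.any_nil]
      · rw [if_neg h2]
        by_cases h3 : (["history", "government", "social"].any
            (fun w => PySem.Chars.isIn w.toList t)) = true
        · rw [if_pos h3]
          have hk : (3 : Int) ∈ pvHits t := by
            obtain ⟨w, hw, h⟩ := List.any_eq_true.mp h3
            fin_cases hw <;> exact pvMem_hits (by decide) h
          rw [pvClassify_eq hk (pvHits_lb (by
                intro wp hm hlt; fin_cases hm <;>
                  first
                    | exact absurd hlt (by decide)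
                    | exact pvNotAny h0 (by decide)
                    | exact pvNotAny h2 (by decide)
                    | exact hma
                    | exact hca
                    | exact hal)),
              if_neg (by decide)]
          decide
        · rw [if_neg h3]
          by_cases h4 : PySem.Chars.isIn "english".toList t = true
          · rw [if_pos h4]
            have hk : (4 : Int) ∈ pvHits t := pvMem_hits (by decide) h4
            rw [pvClassify_eq hk (pvHits_lb (by
                  intro wp hm hlt; fin_cases hm <;>
                    first
                      | exact absurd hlt (by decide)
                      | exact pvNotAny h0 (by decide)
                      | exact pvNotAny h2 (by decide)
                      | exact pvNotAny h3 (by decide)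
                      | exact hma
                      | exact hca
                      | exact hal)),
                if_neg (by decide)]
            decide
          · rw [if_neg h4]
            have hen : PySem.Chars.isIn "english".toList t = false := by
              cases hh : PySem.Chars.isIn "english".toList t
              · rfl
              · exact absurd hh h4
            by_cases h5 : (["art", "music", "drama", "visual"].any
                (fun w => PySem.Chars.isIn w.toList t)) = true
            · rw [if_pos h5]
              have hk : (5 : Int) ∈ pvHits t := by
                obtain ⟨w, hw, h⟩ := List.any_eq_true.mp h5
                fin_cases hw <;> exact pvMem_hits (by decide) h
              rw [pvClassify_eq hk (pvHits_lb (by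
                    intro wp hm hlt; fin_cases hm <;>
                      first
                        | exact absurd hlt (by decide)
                        | exact pvNotAny h0 (by decide)
                        | exact pvNotAny h2 (by decide)
                        | exact pvNotAny h3 (by decide)
                        | exact hma
                        | exact hca
                        | exact hal
                        | exact hen)),
                  if_neg (by decide)]
              decide
            · rw [if_neg h5]
              by_cases h6 : (["pe", "physical education", "health"].any
                  (fun w => PySem.Chars.isIn w.toList t)) = true
              · rw [if_pos h6]
                have hk : (6 : Int) ∈ pvHits t := by
                  obtain ⟨w, hw, h⟩ := List.any_eq_true.mp h6
                  fin_cases hw <;> exact pvMem_hits (by decide) h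
                rw [pvClassify_eq hk (pvHits_lb (by
                      intro wp hm hlt; fin_cases hm <;>
                        first
                          | exact absurd hlt (by decide)
                          | exact pvNotAny h0 (by decide)
                          | exact pvNotAny h2 (by decide)
                          | exact pvNotAny h3 (by decide)
                          | exact pvNotAny h5 (by decide)
                          | exact hma
                          | exact hca
                          | exact hal
                          | exact hen)),
                    if_neg (by decide)]
                decide
              · rw [if_neg h6]
                have hnil : pvHits t = [] := by
                  simp only [pvHits, List.map_eq_nil_iff, List.filter_eq_nil_iff]
                  intro wp hm
                  fin_cases hm <;>
                    first
                      | exact fun hc => Bool.false_ne_true ((pvNotAny h0 (by decide)).symm.trans hc)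
                      | exact fun hc => Bool.false_ne_true ((pvNotAny h2 (by decide)).symm.trans hc)
                      | exact fun hc => Bool.false_ne_true ((pvNotAny h3 (by decide)).symm.trans hc)
                      | exact fun hc => Bool.false_ne_true ((pvNotAny h5 (by decide)).symm.trans hc)
                      | exact fun hc => Bool.false_ne_true ((pvNotAny h6 (by decide)).symm.trans hc)
                      | exact fun hc => Bool.false_ne_true (hma.symm.trans hc)
                      | exact fun hc => Bool.false_ne_true (hca.symm.trans hc)
                      | exact fun hc => Bool.false_ne_true (hal.symm.trans hc)
                      | exact fun hc => Bool.false_ne_true (hen.symm.trans hc)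
                rw [hnil]
                rfl
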